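-- pv_equiv track=rewrite | github.com/smhill001/Data-Management-and-Access | processes/process_L1Y.py | getFilePairs
-- ===== SOURCE A (Python) =====
-- def getFilePairs(files):
--     """
--          Gets pairs of scientific files for each filter
--
--          Parameters:
--          files (Array[string]): list of file names
--          Returns:
--          Array[Array[string]]: list of file name pairs
--     """
--     filters = ['HIA', 'OI', 'CH4', 'NH3']
--     res = []
--     for filter in filters:
--         filePair = []
--         for file in files:
--             if filter in file and "map.fits" in file and file.count("_") == 2:
--                 filePair.append(file)
--
--         res.append(filePair)
--     return res
-- ===== SOURCE B (Python) =====
-- def getFilePairs(files):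
--     """Single pass over files: each qualifying file is dropped into the
--     bucket of every filter it mentions, instead of rescanning the file
--     list once per filter."""
--     hia, oi, ch4, nh3 = [], [], [], []
--     for file in files:
--         if "map.fits" in file and file.count("_") == 2:
--             if 'HIA' in file:
--                 hia.append(file)
--             if 'OI' in file:
--                 oi.append(file)
--             if 'CH4' in file:
--                 ch4.append(file)
--             if 'NH3' in file:
--                 nh3.append(file)
--     return [hia, oi, ch4, nh3]
-- ===== Notes on version B (the rewrite author's own statement) =====
-- stated objective: faster
-- what changed: B replaces A's four separate scans of the file list (one per filter) with a single pass that routes each qualifying file into per-filter buckets maintained simultaneously, testing the map.fits/underscore qualification once per file instead of four times.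
import Mathlib
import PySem

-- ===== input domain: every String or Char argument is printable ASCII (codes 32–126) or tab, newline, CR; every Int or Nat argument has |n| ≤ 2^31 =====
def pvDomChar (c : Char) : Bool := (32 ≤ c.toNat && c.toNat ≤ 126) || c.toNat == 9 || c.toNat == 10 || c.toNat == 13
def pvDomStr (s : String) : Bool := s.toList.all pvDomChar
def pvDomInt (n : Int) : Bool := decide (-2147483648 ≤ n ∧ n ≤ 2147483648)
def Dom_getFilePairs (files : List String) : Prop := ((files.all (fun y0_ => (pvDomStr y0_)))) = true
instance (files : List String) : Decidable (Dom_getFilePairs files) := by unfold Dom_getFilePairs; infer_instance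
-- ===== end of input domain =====

-- B makes one pass over the files, filling the four filter buckets simultaneously,
-- instead of A's four repeated scans of the file list (objective: alternative).


-- ===== PORT A =====
-- 'filter in file and "map.fits" in file and file.count("_") == 2'
def gfpCondA (filt file : String) : Bool :=
  PySem.Str.isIn filt file && PySem.Str.isIn "map.fits" file && (PySem.Str.count file "_" == 2)

def getFilePairs (files : List String) : List (List String) :=
  (["HIA", "OI", "CH4", "NH3"]).foldl
    (fun res filt =>
      res ++ [files.foldl (fun filePair file =>
        if gfpCondA filt file then filePair ++ [file] else filePair) []])
    []

-- ===== PORT B =====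
-- '"map.fits" in file and file.count("_") == 2'
def gfpQual (file : String) : Bool :=
  PySem.Str.isIn "map.fits" file && (PySem.Str.count file "_" == 2)

-- one step of B's loop body on the four buckets
def gfpStep (st : List String × List String × List String × List String) (file : String) :
    List String × List String × List String × List String :=
  if gfpQual file then
    (if PySem.Str.isIn "HIA" file then st.1 ++ [file] else st.1,
     if PySem.Str.isIn "OI" file then st.2.1 ++ [file] else st.2.1,
     if PySem.Str.isIn "CH4" file then st.2.2.1 ++ [file] else st.2.2.1,
     if PySem.Str.isIn "NH3" file then st.2.2.2 ++ [file] else st.2.2.2)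
  else st

def getFilePairs_alt (files : List String) : List (List String) :=
  let st := files.foldl gfpStep ([], [], [], [])
  [st.1, st.2.1, st.2.2.1, st.2.2.2]

-- ===== PRECONDITION & SPEC =====
def Spec_getFilePairs (files : List String) (out : List (List String)) : Prop := out = getFilePairs_alt files
instance (files : List String) (out : List (List String)) : Decidable (Spec_getFilePairs files out) := by unfold Spec_getFilePairs; infer_instance

-- ===== CLAIM (what is proved, stated in full; the proofs are below) =====
def Claim_equal_getFilePairs : Prop := ∀ (files : List String), Dom_getFilePairs files → Spec_getFilePairs files (getFilePairs files)

-- ===== LEMMAS AND PROOFS =====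

-- B's fold, with all four accumulators generalized, collects per-filter filters of the file list.
theorem gfpStep_foldl (files : List String) (h o c n : List String) :
    files.foldl gfpStep (h, o, c, n) =
      (h ++ files.filter (fun f => gfpQual f && PySem.Str.isIn "HIA" f),
       o ++ files.filter (fun f => gfpQual f && PySem.Str.isIn "OI" f),
       c ++ files.filter (fun f => gfpQual f && PySem.Str.isIn "CH4" f),
       n ++ files.filter (fun f => gfpQual f && PySem.Str.isIn "NH3" f)) := by
  induction files generalizing h o c n with
  | nil => simp
  | cons x xs ih =>
      by_cases hq : gfpQual x = true <;>
        simp [gfpStep, hq, ih] <;> split_ifs <;> simp_all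

theorem gfpCondA_comm (filt file : String) :
    gfpCondA filt file = (gfpQual file && PySem.Str.isIn filt file) := by
  simp only [gfpCondA, gfpQual]
  cases PySem.Str.isIn filt file <;> cases PySem.Str.isIn "map.fits" file <;> simp

-- ===== VERDICT (by name: the statement is the Claim_ definition above) =====
theorem getFilePairs_spec : Claim_equal_getFilePairs := by
  intro files _
  show getFilePairs files = getFilePairs_alt files
  have hc : ∀ filt, files.filter (gfpCondA filt) =
      files.filter (fun f => gfpQual f && PySem.Str.isIn filt f) :=
    fun filt => List.filter_congr (fun f _ => gfpCondA_comm filt f)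
  simp only [getFilePairs, getFilePairs_alt, List.foldl_cons, List.foldl_nil,
    PySem.List.foldl_append_if_eq_filter, gfpStep_foldl, List.nil_append, hc]
  rfl
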